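-- pv_equiv track=rewrite | github.com/TakaIshikawa/blueprint | src/blueprint/plan_incident_communication_matrix.py | _audiences
-- ===== SOURCE A (Python) =====
-- from typing import Any, Iterable, Literal, Mapping, TypeVar
--
-- IncidentCommunicationAudience = Literal[
--     "customers",
--     "admins",
--     "support",
--     "customer_success",
--     "operations",
--     "engineering",
--     "data_governance",
--     "security",
--     "vendor_partner",
--     "executives",
-- ]
--
-- IncidentCommunicationRisk = Literal[
--     "reliability",
--     "data_integrity",
--     "migration",
--     "external_integration",
--     "customer_facing",
-- ]
--
-- IncidentCommunicationPriority = Literal["high", "medium", "low"]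
--
-- _AUDIENCE_ORDER: tuple[IncidentCommunicationAudience, ...] = (
--     "customers",
--     "admins",
--     "support",
--     "customer_success",
--     "operations",
--     "engineering",
--     "data_governance",
--     "security",
--     "vendor_partner",
--     "executives",
-- )
--
-- def _audiences(
--     risks: tuple[IncidentCommunicationRisk, ...],
--     priority: IncidentCommunicationPriority,
-- ) -> tuple[IncidentCommunicationAudience, ...]:
--     audiences: list[IncidentCommunicationAudience] = ["operations", "engineering", "support"]
--     if "customer_facing" in risks or priority == "high":
--         audiences.extend(["customers", "customer_success"])
--     if "data_integrity" in risks or "migration" in risks: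
--         audiences.extend(["admins", "data_governance"])
--     if "external_integration" in risks:
--         audiences.extend(["vendor_partner", "security"])
--     if priority == "high":
--         audiences.append("executives")
--     return tuple(audience for audience in _AUDIENCE_ORDER if audience in set(audiences))
-- ===== SOURCE B (Python) =====
-- def _audiences(risks, priority):
--     high = priority == "high"
--     customer = "customer_facing" in risks or high
--     data = "data_integrity" in risks or "migration" in risks
--     external = "external_integration" in risks
--     out = []
--     if customer:
--         out.append("customers")
--     if data:
--         out.append("admins")
--     out.append("support")
--     if customer:
--         out.append("customer_success")
--     out.extend(["operations", "engineering"])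
--     if data:
--         out.append("data_governance")
--     if external:
--         out.extend(["security", "vendor_partner"])
--     if high:
--         out.append("executives")
--     return tuple(out)
-- ===== Notes on version B (the rewrite author's own statement) =====
-- stated objective: simpler
-- what changed: B eliminates A's build-unordered-list-then-set-refilter-against-_AUDIENCE_ORDER entirely: it computes four gating booleans and emits the result segments directly in canonical order by concatenation, with no membership filtering pass and no set.
import Mathlib
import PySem

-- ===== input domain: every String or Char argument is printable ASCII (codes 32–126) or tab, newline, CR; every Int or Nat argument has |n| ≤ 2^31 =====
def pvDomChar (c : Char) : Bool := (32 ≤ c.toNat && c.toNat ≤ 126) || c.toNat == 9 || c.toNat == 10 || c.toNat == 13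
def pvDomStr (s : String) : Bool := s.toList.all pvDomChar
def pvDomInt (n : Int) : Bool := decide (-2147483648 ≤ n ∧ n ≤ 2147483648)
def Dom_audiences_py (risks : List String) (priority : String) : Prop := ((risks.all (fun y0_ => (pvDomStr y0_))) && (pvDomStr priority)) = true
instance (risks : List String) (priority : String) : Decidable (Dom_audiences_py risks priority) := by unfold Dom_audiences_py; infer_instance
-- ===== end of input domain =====

-- B is simpler: it emits the audiences directly in canonical order by conditional concatenation,
-- with no intermediate unordered list, no set and no filtering pass over _AUDIENCE_ORDER.

-- ===== PORT A =====
def pvAudienceOrder : List String :=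
  ["customers", "admins", "support", "customer_success", "operations",
   "engineering", "data_governance", "security", "vendor_partner", "executives"]

def audiences_py (risks : List String) (priority : String) : List String :=
  let audiences : List String := ["operations", "engineering", "support"]
  let audiences := if risks.contains "customer_facing" || priority == "high"
                   then audiences ++ ["customers", "customer_success"] else audiences
  let audiences := if risks.contains "data_integrity" || risks.contains "migration"
                   then audiences ++ ["admins", "data_governance"] else audiences
  let audiences := if risks.contains "external_integration"
                   then audiences ++ ["vendor_partner", "security"] else audiences
  let audiences := if priority == "high" then audiences ++ ["executives"] else audiences
  let s := PySem.Set.ofList audiences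
  pvAudienceOrder.filter (fun a => PySem.Set.contains s a)

-- ===== PORT B =====
def audiences_py_alt (risks : List String) (priority : String) : List String :=
  let high := priority == "high"
  let customer := risks.contains "customer_facing" || high
  let data := risks.contains "data_integrity" || risks.contains "migration"
  let external := risks.contains "external_integration"
  (if customer then ["customers"] else []) ++
  (if data then ["admins"] else []) ++
  ["support"] ++
  (if customer then ["customer_success"] else []) ++
  ["operations", "engineering"] ++
  (if data then ["data_governance"] else []) ++
  (if external then ["security", "vendor_partner"] else []) ++
  (if high then ["executives"] else [])

-- ===== PRECONDITION & SPEC =====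
def Spec_audiences_py (risks : List String) (priority : String) (out : List String) : Prop := out = audiences_py_alt risks priority
instance (risks : List String) (priority : String) (out : List String) : Decidable (Spec_audiences_py risks priority out) := by unfold Spec_audiences_py; infer_instance

-- ===== CLAIM =====
def Claim_equal_audiences_py : Prop := ∀ (risks : List String) (priority : String), Dom_audiences_py risks priority → Spec_audiences_py risks priority (audiences_py risks priority)

-- ===== LEMMAS AND PROOFS =====

-- ===== VERDICT =====
theorem audiences_py_spec : Claim_equal_audiences_py := by
  intro risks priority _
  show audiences_py risks priority = audiences_py_alt risks priority
  unfold audiences_py audiences_py_alt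
  cases h1 : risks.contains "customer_facing" <;>
  cases h2 : risks.contains "data_integrity" <;>
  cases h3 : risks.contains "migration" <;>
  cases h4 : risks.contains "external_integration" <;>
  cases h5 : priority == "high" <;>
    simp [h1, h2, h3, h4, h5, pvAudienceOrder,
      PySem.Set.ofList, PySem.Set.contains, PySem.Set.add, List.filter]
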